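-- pv_equiv track=rewrite | github.com/FNAL-AC-LGAD/TestbeamReco | macros/myFunctions.py | get_edge_indices
-- ===== SOURCE A (Python) =====
-- def get_edge_indices(indices_list):
--     is_edge = True
--     row, col = 9, int(indices_list[-1][1])
--     edge_indices = []
--     for idx in indices_list:
--         # Left edge when moving to a new row
--         if row != int(idx[0]):
--             row = int(idx[0])
--             is_edge = True
--         # Right edge when in last column (!) assuming all rows have the same number (!)
--         elif int(idx[1]) == col:
--             is_edge = True
--         else:
--             is_edge = False
--
--         if is_edge:
--             edge_indices.append(idx)
--
--     return edge_indices
-- ===== SOURCE B (Python) =====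
-- def get_edge_indices(indices_list):
--     col = int(indices_list[-1][1])
--     out = []
--     i, n = 0, len(indices_list)
--     while i < n:
--         # find the end of the run of equal consecutive rows starting at i
--         j = i + 1
--         while j < n and int(indices_list[j][0]) == int(indices_list[i][0]):
--             j += 1
--         # the first element of a run is always a left edge
--         out.append(indices_list[i])
--         # within the run, keep only the elements in the last column
--         out.extend(idx for idx in indices_list[i + 1:j] if int(idx[1]) == col)
--         i = j
--     return out
-- ===== Notes on version B (the rewrite author's own statement) =====
-- stated objective: alternative
-- what changed: Replaces the running row/is_edge state machine by a group-then-scan pass: an index scan finds each run of equal consecutive rows, always emits the run's first element and then the run members in the last column.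
-- intended difference: On nonempty lists whose first row index is 9 (A's arbitrary sentinel initial row) and whose first element's column differs from the last element's column, A silently drops the first element, while B returns it, as intended: the first element always starts a new row and is a left edge. — e.g. on get_edge_indices([(9, 1), (9, 0)]): A returns [(9, 0)], B returns [(9, 1), (9, 0)]
import Mathlib
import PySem

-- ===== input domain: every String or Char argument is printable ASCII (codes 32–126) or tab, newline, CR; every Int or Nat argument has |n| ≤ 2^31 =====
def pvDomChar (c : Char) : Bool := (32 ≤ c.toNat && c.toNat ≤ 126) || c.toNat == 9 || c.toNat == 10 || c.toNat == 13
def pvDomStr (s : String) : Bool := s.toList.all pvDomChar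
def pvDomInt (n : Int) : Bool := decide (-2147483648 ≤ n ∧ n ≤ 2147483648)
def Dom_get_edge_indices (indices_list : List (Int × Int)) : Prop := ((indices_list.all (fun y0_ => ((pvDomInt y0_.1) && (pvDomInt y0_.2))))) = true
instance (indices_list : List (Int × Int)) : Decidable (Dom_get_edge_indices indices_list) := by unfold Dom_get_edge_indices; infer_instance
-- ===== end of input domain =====

-- B replaces A's running row/is_edge state machine by a group-then-scan pass over runs of
-- equal consecutive rows (objective: alternative decomposition, same cost); B intentionally
-- keeps the first element even when A's sentinel row 9 makes A drop it (see D_ below).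

-- ===== PORT A =====
-- A's for-loop as structural recursion over the same state (row, acc); is_edge is the
-- append decision of the iteration it is computed in.
def pvALoop (col row : Int) (acc : List (Int × Int)) : List (Int × Int) → List (Int × Int)
  | [] => acc
  | idx :: rest =>
    if row ≠ idx.1 then pvALoop col idx.1 (acc ++ [idx]) rest
    else if idx.2 = col then pvALoop col row (acc ++ [idx]) rest
    else pvALoop col row acc rest

def get_edge_indices (indices_list : List (Int × Int)) : List (Int × Int) :=
  -- col = int(indices_list[-1][1]); Pre_ excludes the empty list, where Python raises IndexError
  let col : Int := ((PySem.List.pyGet? indices_list (-1)).getD (0, 0)).2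
  pvALoop col 9 [] indices_list

-- ===== PORT B =====
-- inner while loop: j advances while xs[j] has row r (indices are in range whenever
-- accessed); fuel = xs.length only makes the recursion structural, it is never exhausted
def pvRunEnd (xs : List (Int × Int)) (r : Int) : Nat → Nat → Nat
  | 0, j => j
  | fuel + 1, j =>
    if j < xs.length ∧ (xs.getD j (0, 0)).1 = r then pvRunEnd xs r fuel (j + 1) else j

-- outer while loop over i; out is built as the concatenation of per-run segments
def pvBLoop (xs : List (Int × Int)) (col : Int) : Nat → Nat → List (Int × Int)
  | 0, _ => []
  | fuel + 1, i =>
    if i < xs.length then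
      -- j = pvRunEnd … is the run end; xs[i+1:j] with 0 ≤ i+1 ≤ j ≤ len is exact as drop/take
      (xs.getD i (0, 0)) ::
        (((xs.drop (i + 1)).take (pvRunEnd xs (xs.getD i (0, 0)).1 xs.length (i + 1) - (i + 1))).filter
            (fun idx => idx.2 = col)
          ++ pvBLoop xs col fuel (pvRunEnd xs (xs.getD i (0, 0)).1 xs.length (i + 1)))
    else []

def get_edge_indices_alt (indices_list : List (Int × Int)) : List (Int × Int) :=
  let col : Int := ((PySem.List.pyGet? indices_list (-1)).getD (0, 0)).2
  pvBLoop indices_list col indices_list.length 0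

-- ===== PRECONDITION & SPEC =====
-- Pre_ excludes exactly the empty list, on which Python A raises IndexError (and B does too).
def Pre_get_edge_indices (indices_list : List (Int × Int)) : Prop := indices_list ≠ []
instance (indices_list : List (Int × Int)) : Decidable (Pre_get_edge_indices indices_list) := by unfold Pre_get_edge_indices; infer_instance
def pvWitness_get_edge_indices : (List (Int × Int)) := [(0, 0)]

-- On nonempty lists whose first row index is 9 (A's arbitrary sentinel initial row) and whose
-- first element's column differs from the last element's column, A silently drops the first
-- element, while B returns it, as intended: the first element always starts a new row and is a left edge.
def D_get_edge_indices (indices_list : List (Int × Int)) : Prop :=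
  match indices_list with
  | [] => False
  | x :: rest => x.1 = 9 ∧ x.2 ≠ ((x :: rest).getLast (List.cons_ne_nil x rest)).2
instance (indices_list : List (Int × Int)) : Decidable (D_get_edge_indices indices_list) := by
  unfold D_get_edge_indices
  cases indices_list <;> infer_instance

def Spec_get_edge_indices (indices_list : List (Int × Int)) (out : List (Int × Int)) : Prop := ¬ D_get_edge_indices indices_list → out = get_edge_indices_alt indices_list
instance (indices_list : List (Int × Int)) (out : List (Int × Int)) : Decidable (Spec_get_edge_indices indices_list out) := by unfold Spec_get_edge_indices; infer_instance

def pvDiffWitness_get_edge_indices : (List (Int × Int)) := [(9, 1), (9, 0)]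
def pvDiffWitnessOut_get_edge_indices : (List (Int × Int)) × (List (Int × Int)) := ([(9, 0)], [(9, 1), (9, 0)])

-- ===== CLAIM (what is proved, stated in full; the proofs are below) =====
def Claim_unchanged_get_edge_indices : Prop := ∀ (indices_list : List (Int × Int)), Dom_get_edge_indices indices_list → Pre_get_edge_indices indices_list → Spec_get_edge_indices indices_list (get_edge_indices indices_list)
def Claim_changed_get_edge_indices : Prop := Dom_get_edge_indices (pvDiffWitness_get_edge_indices) ∧ Pre_get_edge_indices (pvDiffWitness_get_edge_indices) ∧ D_get_edge_indices (pvDiffWitness_get_edge_indices) ∧ get_edge_indices (pvDiffWitness_get_edge_indices) = pvDiffWitnessOut_get_edge_indices.1 ∧ get_edge_indices_alt (pvDiffWitness_get_edge_indices) = pvDiffWitnessOut_get_edge_indices.2 ∧ pvDiffWitnessOut_get_edge_indices.1 ≠ pvDiffWitnessOut_get_edge_indices.2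
def Claim_exact_get_edge_indices : Prop := ∀ (indices_list : List (Int × Int)), Dom_get_edge_indices indices_list → Pre_get_edge_indices indices_list → D_get_edge_indices indices_list → get_edge_indices indices_list ≠ get_edge_indices_alt indices_list

-- ===== LEMMAS AND PROOFS =====

-- span-based reformulation of B used only in the proofs
def pvBSpan (col : Int) : List (Int × Int) → List (Int × Int)
  | [] => []
  | x :: rest =>
    x :: ((rest.takeWhile (fun p => p.1 = x.1)).filter (fun idx => idx.2 = col)
          ++ pvBSpan col (rest.dropWhile (fun p => p.1 = x.1)))
termination_by l => l.length
decreasing_by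
  simpa using Nat.lt_succ_of_le (List.length_dropWhile_le _ _)

theorem pvRunEnd_eq (xs : List (Int × Int)) (r : Int) :
    ∀ (fuel j : Nat), xs.length ≤ j + fuel →
      pvRunEnd xs r fuel j = j + ((xs.drop j).takeWhile (fun p => p.1 = r)).length := by
  intro fuel
  induction fuel with
  | zero =>
      intro j hf
      rw [pvRunEnd, List.drop_eq_nil_of_le (by omega)]
      simp
  | succ fuel ih =>
      intro j hf
      rw [pvRunEnd]
      rcases Nat.lt_or_ge j xs.length with hj | hj
      · have hdrop : xs.drop j = xs.getD j (0,0) :: xs.drop (j + 1) := by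
          rw [List.getD_eq_getElem _ _ hj]
          exact (List.drop_eq_getElem_cons hj)
        by_cases hr : (xs.getD j (0,0)).1 = r
        · rw [if_pos ⟨hj, hr⟩, ih (j + 1) (by omega), hdrop, List.takeWhile_cons,
            if_pos (by simpa using hr)]
          simp; omega
        · rw [if_neg (by tauto), hdrop, List.takeWhile_cons, if_neg (by simpa using hr)]
          simp
      · rw [if_neg (by omega), List.drop_eq_nil_of_le hj]
        simp

theorem pv_take_len_takeWhile {α : Type} (p : α → Bool) (l : List α) :
    l.take (l.takeWhile p).length = l.takeWhile p := by
  induction l with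
  | nil => simp
  | cons x xs ih =>
      by_cases h : p x
      · simp [h, ih]
      · simp [h]

theorem pv_drop_len_takeWhile {α : Type} (p : α → Bool) (l : List α) :
    l.drop (l.takeWhile p).length = l.dropWhile p := by
  induction l with
  | nil => simp
  | cons x xs ih =>
      by_cases h : p x
      · simp [List.dropWhile_cons, h, ih]
      · simp [List.dropWhile_cons, h]

theorem pvBLoop_eq_span (xs : List (Int × Int)) (col : Int) :
    ∀ (fuel i : Nat), xs.length ≤ i + fuel →
      pvBLoop xs col fuel i = pvBSpan col (xs.drop i) := by
  intro fuel
  induction fuel with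
  | zero =>
      intro i hf
      rw [pvBLoop, List.drop_eq_nil_of_le (by omega), pvBSpan]
  | succ fuel ih =>
      intro i hf
      rw [pvBLoop]
      rcases Nat.lt_or_ge i xs.length with hi | hi
      · rw [if_pos hi]
        have hdrop : xs.drop i = xs.getD i (0,0) :: xs.drop (i + 1) := by
          rw [List.getD_eq_getElem _ _ hi]
          exact (List.drop_eq_getElem_cons hi)
        have hj : pvRunEnd xs (xs.getD i (0,0)).1 xs.length (i + 1) =
            (i + 1) + ((xs.drop (i + 1)).takeWhile (fun p => p.1 = (xs.getD i (0,0)).1)).length :=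
          pvRunEnd_eq xs _ xs.length (i + 1) (by omega)
        have htake : (xs.drop (i + 1)).take
              (pvRunEnd xs (xs.getD i (0,0)).1 xs.length (i + 1) - (i + 1)) =
            (xs.drop (i + 1)).takeWhile (fun p => p.1 = (xs.getD i (0,0)).1) := by
          rw [hj, Nat.add_sub_cancel_left, pv_take_len_takeWhile]
        have hdw : xs.drop (pvRunEnd xs (xs.getD i (0,0)).1 xs.length (i + 1)) =
            (xs.drop (i + 1)).dropWhile (fun p => p.1 = (xs.getD i (0,0)).1) := by
          rw [hj, ← List.drop_drop, pv_drop_len_takeWhile]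
        rw [hdrop, pvBSpan]
        rw [ih (pvRunEnd xs (xs.getD i (0,0)).1 xs.length (i + 1)) (by rw [hj]; omega), htake, hdw]
      · rw [if_neg (by omega), List.drop_eq_nil_of_le hi, pvBSpan]

theorem pvALoop_run (col r : Int) (rest acc : List (Int × Int)) :
    pvALoop col r acc rest =
      pvALoop col r (acc ++ (rest.takeWhile (fun p => p.1 = r)).filter (fun idx => idx.2 = col))
        (rest.dropWhile (fun p => p.1 = r)) := by
  induction rest generalizing acc with
  | nil => simp
  | cons y ys ih =>
      by_cases hy : y.1 = r
      · rw [pvALoop, if_neg (by simp [hy]), List.takeWhile_cons, List.dropWhile_cons]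
        by_cases hc : y.2 = col
        · rw [if_pos hc, ih]
          simp [hy, hc]
        · rw [if_neg hc, ih]
          simp [hy, hc]
      · simp [List.dropWhile_cons, hy]

theorem pv_head_dropWhile {α : Type} (p : α → Bool) (l : List α) (x : α) (xs : List α)
    (h : l.dropWhile p = x :: xs) : p x = false := by
  induction l with
  | nil => simp at h
  | cons y ys ih =>
      rw [List.dropWhile_cons] at h
      by_cases hy : p y
      · rw [if_pos hy] at h; exact ih h
      · rw [if_neg hy] at h
        cases h; simpa using hy

-- main invariant: whenever the next element starts a new row for A (or matches the column),
-- A's loop from state (row, acc) produces acc ++ the span-based group output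
theorem pvALoop_eq_span (col : Int) :
    ∀ (n : Nat) (xs : List (Int × Int)), xs.length ≤ n →
      ∀ (row : Int) (acc : List (Int × Int)),
      (∀ x ∈ xs.head?, row ≠ x.1 ∨ x.2 = col) →
      pvALoop col row acc xs = acc ++ pvBSpan col xs := by
  intro n
  induction n with
  | zero =>
      intro xs hn row acc _
      have : xs = [] := List.length_eq_zero_iff.mp (by omega)
      subst this
      simp [pvALoop, pvBSpan]
  | succ n IH =>
      intro xs hn row acc hok
      cases xs with
      | nil => simp [pvALoop, pvBSpan]
      | cons x rest =>
          have hstep : pvALoop col row acc (x :: rest) = pvALoop col x.1 (acc ++ [x]) rest := by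
            rcases hok x (by simp) with h | h
            · rw [pvALoop, if_pos h]
            · by_cases hr : row ≠ x.1
              · rw [pvALoop, if_pos hr]
              · rw [pvALoop, if_neg hr, if_pos h]
                rw [Decidable.not_not.mp hr]
          rw [hstep, pvALoop_run, pvBSpan]
          have hlen : (rest.dropWhile (fun p => p.1 = x.1)).length ≤ n := by
            have := List.length_dropWhile_le (fun p : Int × Int => decide (p.1 = x.1)) rest
            simp at hn
            omega
          rw [IH _ hlen x.1 _ ?_]
          · simp
          · intro y hy
            left
            cases hdw : rest.dropWhile (fun p => decide (p.1 = x.1)) with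
            | nil => rw [hdw] at hy; simp at hy
            | cons z zs =>
                rw [hdw] at hy
                simp at hy
                subst hy
                have hz : z.1 ≠ x.1 := by
                  simpa using pv_head_dropWhile _ rest z zs hdw
                exact fun h => hz h.symm

theorem pv_col_last (x : Int × Int) (rest : List (Int × Int)) :
    ((PySem.List.pyGet? (x :: rest) (-1)).getD (0, 0)).2 =
      ((x :: rest).getLast (List.cons_ne_nil x rest)).2 := by
  rw [PySem.List.pyGet?_neg_one,
    List.getLast?_eq_some_getLast (l := x :: rest) (List.cons_ne_nil x rest)]
  rfl

theorem pv_alt_span (xs : List (Int × Int)) :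
    get_edge_indices_alt xs = pvBSpan (((PySem.List.pyGet? xs (-1)).getD (0, 0)).2) xs := by
  show pvBLoop xs _ xs.length 0 = _
  rw [pvBLoop_eq_span xs _ xs.length 0 (by omega)]
  simp

-- ===== VERDICT (by name: the statement is the Claim_ definition above) =====
theorem get_edge_indices_spec : Claim_unchanged_get_edge_indices := by
  intro xs _ hpre hnd
  rw [pv_alt_span]
  show pvALoop _ 9 [] xs = _
  cases xs with
  | nil => exact absurd rfl hpre
  | cons x rest =>
      rw [pvALoop_eq_span _ (x :: rest).length (x :: rest) le_rfl 9 [] ?_]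
      · simp
      · intro y hy
        simp at hy
        subst hy
        unfold D_get_edge_indices at hnd
        by_cases h9 : (9 : Int) = x.1
        · right
          rw [pv_col_last]
          by_contra hc
          exact hnd ⟨h9.symm, hc⟩
        · exact Or.inl h9

theorem get_edge_indices_changed : Claim_changed_get_edge_indices := by
  unfold Claim_changed_get_edge_indices; decide

theorem get_edge_indices_tight : Claim_exact_get_edge_indices := by
  intro xs _ hpre hd
  cases xs with
  | nil => exact absurd rfl hpre
  | cons x rest =>
      unfold D_get_edge_indices at hd
      obtain ⟨h9, hc⟩ := hd
      rw [← pv_col_last] at hc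
      -- A skips the head, then behaves like the span pass; B is head :: that span pass
      have hA : get_edge_indices (x :: rest) =
          (pvBSpan (((PySem.List.pyGet? (x :: rest) (-1)).getD (0, 0)).2) (x :: rest)).tail := by
        show pvALoop _ 9 [] (x :: rest) = _
        rw [pvALoop, if_neg (by simpa using h9.symm), if_neg hc, pvALoop_run, pvBSpan, ← h9]
        rw [pvALoop_eq_span _ rest.length (rest.dropWhile (fun p => p.1 = x.1))
              (List.length_dropWhile_le _ _) x.1 _ ?_]
        · simp
        · intro y hy
          left
          cases hdw : rest.dropWhile (fun p => decide (p.1 = x.1)) with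
          | nil => rw [hdw] at hy; simp at hy
          | cons z zs =>
              rw [hdw] at hy
              simp at hy
              subst hy
              have hz : z.1 ≠ x.1 := by
                simpa using pv_head_dropWhile _ rest z zs hdw
              exact fun h => hz h.symm
      rw [pv_alt_span, hA]
      intro heq
      have := congrArg List.length heq
      rw [pvBSpan] at this
      simp at this
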